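-- pv_equiv track=rewrite | github.com/ibukiIWAMURA/master-ILM | expressivity/Expressivity.py | combinate_sentence_rules_with_duplication
-- ===== SOURCE A (Python) =====
-- from itertools import product
--
-- def combinate_sentence_rules_with_duplication(all_detected_results):
--     complete_sentence_rules_with_duplication = []
--
--     for detected_result in all_detected_results:
--         # スロット付き文ルールとそのカテゴリーラベル
--         sentence_rule, category_label_slots = detected_result[0]
--         slot_candidates = detected_result[1]
--
--         sentence_structure, form_structure = sentence_rule  # 文構造と形式構造
--         slots_with_labels = category_label_slots[0]  # スロットの完全な表記（例：T/x）
--         labels = category_label_slots[1]  # ラベルだけのリスト（例：T）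
--
--         # スロットのラベルに対応する候補をマッピング
--         label_to_candidates = {}
--         for candidate in slot_candidates:
--             label = candidate[0][0]  # ラベル（例：T, D, W）
--             if label not in label_to_candidates:
--                 label_to_candidates[label] = []
--             label_to_candidates[label].append(candidate)
--
--         # 各スロットに対応する候補の組み合わせを取得
--         slot_filled_combinations = []
--         for label in labels:
--             if label in label_to_candidates:
--                 slot_filled_combinations.append(label_to_candidates[label])
--
--         # 各スロット候補の全組み合わせを生成
--         all_combinations = product(*slot_filled_combinations)
--
--         # 各組み合わせでスロットを埋めて完全な文ルールを作成
--         for combination in all_combinations: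
--             filled_sentence = sentence_structure
--             filled_form = form_structure
--
--             # スロットを埋める
--             for slot, candidate in zip(slots_with_labels, combination):
--                 variable = f"_{slot[2]}"  # 変項（例：_x）
--                 candidate_text = candidate[0][2:]  # 候補のテキスト（例：alice）
--                 filled_sentence = filled_sentence.replace(variable, candidate_text)
--                 filled_form = filled_form.replace(slot, candidate[1])
--
--             complete_sentence_rules_with_duplication.append([filled_sentence, filled_form])
--
--     return complete_sentence_rules_with_duplication
-- ===== SOURCE B (Python) =====
-- def combinate_sentence_rules_with_duplication(all_detected_results):
--     results = []
--     for (sentence_rule, (slots_with_labels, labels)), slot_candidates in all_detected_results: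
--         sentence_structure, form_structure = sentence_rule
--
--         # one candidate list per usable label, by direct filtering (no dict)
--         candidate_lists = [[c for c in slot_candidates if c[0][:1] == label]
--                            for label in labels
--                            if any(c[0][:1] == label for c in slot_candidates)]
--
--         # grow partial fillings slot by slot; candidates innermost (last slot varies fastest)
--         partials = [(sentence_structure, form_structure)]
--         for slot, candidates in zip(slots_with_labels, candidate_lists):
--             variable = "_" + slot[2]
--             partials = [(s.replace(variable, c[0][2:]), f.replace(slot, c[1]))
--                         for s, f in partials for c in candidates]
--
--         results.extend([s, f] for s, f in partials)
--     return results
-- ===== Notes on version B (the rewrite author's own statement) =====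
-- stated objective: alternative
-- what changed: B drops the dict grouping and itertools.product: it filters candidates per label directly and grows the partial fillings slot by slot with a fold (candidates innermost, so the ordering matches product). …
import Mathlib
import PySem

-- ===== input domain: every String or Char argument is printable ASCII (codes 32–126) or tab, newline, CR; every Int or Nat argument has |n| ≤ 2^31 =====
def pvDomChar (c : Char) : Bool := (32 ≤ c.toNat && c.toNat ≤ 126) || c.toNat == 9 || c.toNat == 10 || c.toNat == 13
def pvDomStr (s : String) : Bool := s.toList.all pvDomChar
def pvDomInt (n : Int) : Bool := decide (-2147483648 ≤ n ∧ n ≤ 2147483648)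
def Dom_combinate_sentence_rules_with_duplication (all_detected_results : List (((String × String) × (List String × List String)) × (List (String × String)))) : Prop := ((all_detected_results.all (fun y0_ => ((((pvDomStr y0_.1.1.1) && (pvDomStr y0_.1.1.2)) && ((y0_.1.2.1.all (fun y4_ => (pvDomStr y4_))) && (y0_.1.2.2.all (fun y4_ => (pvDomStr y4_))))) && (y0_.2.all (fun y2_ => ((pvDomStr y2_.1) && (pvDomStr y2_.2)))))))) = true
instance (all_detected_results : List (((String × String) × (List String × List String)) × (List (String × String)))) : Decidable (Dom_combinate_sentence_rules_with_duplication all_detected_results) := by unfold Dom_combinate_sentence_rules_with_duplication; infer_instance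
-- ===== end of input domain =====

-- B replaces itertools.product + per-combination refill by direct per-label filtering and a
-- slot-by-slot fold that grows partial fillings (alternative decomposition, not faster).

-- ===== PORT A =====
-- candidate[0][0] as a 1-character string (the dict key); Python raises IndexError on an
-- empty candidate[0] — those inputs are excluded by Pre_, the 'none' branch is a dummy.
def pvLabelOf (c : String × String) : String :=
  match PySem.Str.pyGet? c.1 0 with
  | some ch => String.ofList [ch]
  | none => ""

-- itertools.product(*ls) in product order (last list varies fastest)
def pvProduct (ls : List (List (String × String))) : List (List (String × String)) :=
  match ls with
  | [] => [[]]
  | l :: rest => l.flatMap (fun a => (pvProduct rest).map (fun t => a :: t))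

-- one step of A's inner zip loop: slot[2] raises IndexError on a slot shorter than 3
-- (excluded by Pre_, the 'none' branch is a dummy)
def pvFillA (p : String × String) (sc : String × (String × String)) : String × String :=
  match PySem.Str.pyGet? sc.1 2 with
  | some ch =>
      (PySem.Str.replace p.1 (String.ofList ['_', ch]) (PySem.Str.slice sc.2.1 (some 2) none),
       PySem.Str.replace p.2 sc.1 sc.2.2)
  | none => p

def combinate_sentence_rules_with_duplication (all_detected_results : List (((String × String) × (List String × List String)) × (List (String × String)))) : List (List String) :=
  all_detected_results.foldl
    (fun complete detected_result =>
      let sentence_rule := detected_result.1.1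
      let category_label_slots := detected_result.1.2
      let slot_candidates := detected_result.2
      let sentence_structure := sentence_rule.1
      let form_structure := sentence_rule.2
      let slots_with_labels := category_label_slots.1
      let labels := category_label_slots.2
      -- "if label not in d: d[label] = []; d[label].append(candidate)"  =  d[label] = d.get(label, []) + [candidate]
      let label_to_candidates :=
        slot_candidates.foldl
          (fun d candidate => d.modify (pvLabelOf candidate) [] (fun v => v ++ [candidate]))
          PySem.Dict.empty
      let slot_filled_combinations :=
        labels.foldl
          (fun acc label =>
            if label_to_candidates.contains label then acc ++ [label_to_candidates.getD label []] else acc)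
          []
      let all_combinations := pvProduct slot_filled_combinations
      all_combinations.foldl
        (fun complete combination =>
          let filled := (slots_with_labels.zip combination).foldl pvFillA (sentence_structure, form_structure)
          complete ++ [[filled.1, filled.2]])
        complete)
    []

-- ===== PORT B =====
-- one step of B's fold: expand every partial filling with every candidate of the next slot
def pvStepB (ps : List (String × String)) (sc : String × List (String × String)) : List (String × String) :=
  ps.flatMap (fun p =>
    sc.2.map (fun c =>
      match PySem.Str.pyGet? sc.1 2 with
      | some ch =>
          (PySem.Str.replace p.1 (String.ofList ['_', ch]) (PySem.Str.slice c.1 (some 2) none),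
           PySem.Str.replace p.2 sc.1 c.2)
      | none => p))

def combinate_sentence_rules_with_duplication_alt (all_detected_results : List (((String × String) × (List String × List String)) × (List (String × String)))) : List (List String) :=
  all_detected_results.foldl
    (fun results dr =>
      let sentence_structure := dr.1.1.1
      let form_structure := dr.1.1.2
      let slots_with_labels := dr.1.2.1
      let labels := dr.1.2.2
      let slot_candidates := dr.2
      let candidate_lists :=
        (labels.filter (fun label =>
            slot_candidates.any (fun c => PySem.Str.slice c.1 none (some 1) == label))).map
          (fun label => slot_candidates.filter (fun c => PySem.Str.slice c.1 none (some 1) == label))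
      let partials := (slots_with_labels.zip candidate_lists).foldl pvStepB [(sentence_structure, form_structure)]
      results ++ partials.map (fun p => [p.1, p.2]))
    []

-- ===== PRECONDITION & SPEC =====
-- the first character of each candidate's first string, as a one-element list ([] if empty)
def pvFirstTokens (cands : List (String × String)) : List (List Char) :=
  cands.map (fun c => c.1.toList.take 1)

def pvPresentAux : List String → List (List Char) → List String
  | [], _ => []
  | l :: ls, fs => if l.toList ∈ fs then l :: pvPresentAux ls fs else pvPresentAux ls fs

-- labels that have at least one candidate (some candidate's first character equals the label), in label order
def pvPresent (labels : List String) (cands : List (String × String)) : List String :=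
  pvPresentAux labels (PySem.Set.ofList (pvFirstTokens cands))

-- Pre_ excludes (a) the inputs where A raises IndexError — a candidate with an empty first
-- string (candidate[0][0]), or a slot of length < 3 (slot[2]) among the slots the zip reaches —
-- and (b) the inputs where a detected_result has more candidate-bearing labels than slots and
-- such an unused extra label has ≥ 2 candidates: the zip truncation leaves those extra
-- combinations unused, and how many identical copies of each filled rule to emit for them
-- (A: one per unused combination; B: one) is an unspecified corner nobody would pin down.
def Pre_combinate_sentence_rules_with_duplication (all_detected_results : List (((String × String) × (List String × List String)) × (List (String × String)))) : Prop :=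
  ∀ dr ∈ all_detected_results,
    (∀ c ∈ dr.2, c.1 ≠ "") ∧
    (∀ s ∈ dr.1.2.1.take (pvPresent dr.1.2.2 dr.2).length, 3 ≤ s.toList.length) ∧
    (∀ l ∈ (pvPresent dr.1.2.2 dr.2).drop dr.1.2.1.length, (pvFirstTokens dr.2).count l.toList ≤ 1)
instance (all_detected_results : List (((String × String) × (List String × List String)) × (List (String × String)))) : Decidable (Pre_combinate_sentence_rules_with_duplication all_detected_results) := by unfold Pre_combinate_sentence_rules_with_duplication; infer_instance

def pvWitness_combinate_sentence_rules_with_duplication : (List (((String × String) × (List String × List String)) × (List (String × String)))) :=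
  [((("ab _x", "F T/x"), (["T/x"], ["T"])), [("T:alice", "A")])]

def Spec_combinate_sentence_rules_with_duplication (all_detected_results : List (((String × String) × (List String × List String)) × (List (String × String)))) (out : List (List String)) : Prop := out = combinate_sentence_rules_with_duplication_alt all_detected_results
instance (all_detected_results : List (((String × String) × (List String × List String)) × (List (String × String)))) (out : List (List String)) : Decidable (Spec_combinate_sentence_rules_with_duplication all_detected_results out) := by unfold Spec_combinate_sentence_rules_with_duplication; infer_instance

-- ===== CLAIM (what is proved, stated in full; the proofs are below) =====
def Claim_equal_combinate_sentence_rules_with_duplication : Prop := ∀ (all_detected_results : List (((String × String) × (List String × List String)) × (List (String × String)))), Dom_combinate_sentence_rules_with_duplication all_detected_results → Pre_combinate_sentence_rules_with_duplication all_detected_results → Spec_combinate_sentence_rules_with_duplication all_detected_results (combinate_sentence_rules_with_duplication all_detected_results)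

-- ===== LEMMAS AND PROOFS =====

-- proof-side views of the two per-item computations
def pvDictA (cands : List (String × String)) : PySem.Dict String (List (String × String)) :=
  cands.foldl (fun d c => d.modify (pvLabelOf c) [] (fun v => v ++ [c])) PySem.Dict.empty

def pvListsA (cands : List (String × String)) (labels : List String) : List (List (String × String)) :=
  (labels.filter (fun l => (pvDictA cands).contains l)).map (fun l => (pvDictA cands).getD l [])

def pvCandListsB (cands : List (String × String)) (labels : List String) : List (List (String × String)) :=
  (labels.filter (fun label => cands.any (fun c => PySem.Str.slice c.1 none (some 1) == label))).map
    (fun label => cands.filter (fun c => PySem.Str.slice c.1 none (some 1) == label))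

def pvItemA (dr : ((String × String) × (List String × List String)) × (List (String × String))) : List (List String) :=
  (pvProduct (pvListsA dr.2 dr.1.2.2)).map
    (fun combo =>
      let filled := (dr.1.2.1.zip combo).foldl pvFillA (dr.1.1.1, dr.1.1.2)
      [filled.1, filled.2])

def pvItemB (dr : ((String × String) × (List String × List String)) × (List (String × String))) : List (List String) :=
  ((dr.1.2.1.zip (pvCandListsB dr.2 dr.1.2.2)).foldl pvStepB [(dr.1.1.1, dr.1.1.2)]).map
    (fun p => [p.1, p.2])

theorem pvStepB_eq (ps : List (String × String)) (sc : String × List (String × String)) :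
    pvStepB ps sc = ps.flatMap (fun p => sc.2.map (fun c => pvFillA p (sc.1, c))) := rfl

theorem pvStepB_from_list (zl : List (String × List (String × String))) (ps : List (String × String)) :
    zl.foldl pvStepB ps = ps.flatMap (fun p => zl.foldl pvStepB [p]) := by
  induction zl generalizing ps with
  | nil => simp
  | cons sc zl ih =>
      simp only [List.foldl_cons]
      rw [ih (pvStepB ps sc)]
      rw [List.flatMap_congr (fun p (_ : p ∈ ps) => ih (pvStepB [p] sc))]
      rw [pvStepB_eq]
      simp [List.flatMap_assoc, pvStepB_eq]

theorem pvProduct_singletons (ls : List (List (String × String)))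
    (h : ∀ l ∈ ls, ∃ a, l = [a]) : ∃ t, pvProduct ls = [t] := by
  induction ls with
  | nil => exact ⟨[], rfl⟩
  | cons l rest ih =>
      obtain ⟨a, rfl⟩ := h l (by simp)
      obtain ⟨t, ht⟩ := ih (fun x hx => h x (by simp [hx]))
      exact ⟨a :: t, by simp [pvProduct, ht]⟩

-- the heart: product-then-fill equals the slot-by-slot fold, as long as every candidate
-- list the zip truncates away is a singleton
theorem pvRunEq (lists : List (List (String × String))) (slots : List String) (p : String × String)
    (h : ∀ l ∈ lists.drop slots.length, ∃ a, l = [a]) :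
    (pvProduct lists).map (fun combo => (slots.zip combo).foldl pvFillA p)
      = (slots.zip lists).foldl pvStepB [p] := by
  induction lists generalizing slots p with
  | nil => simp [pvProduct]
  | cons cl ls ih =>
      cases slots with
      | nil =>
          obtain ⟨t, ht⟩ := pvProduct_singletons (cl :: ls) (by simpa using h)
          simp [ht]
      | cons slot ss =>
          simp only [pvProduct, List.map_flatMap, List.map_map, List.zip_cons_cons,
            List.foldl_cons]
          rw [pvStepB_from_list]
          rw [pvStepB_eq]
          simp only [List.flatMap_map, List.flatMap_singleton]
          refine List.flatMap_congr (fun a _ => ?_)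
          simpa using ih ss (pvFillA p (slot, a)) (by simpa using h)

theorem pvDictA_getD (cands : List (String × String)) (l : String) :
    (pvDictA cands).getD l [] = cands.filter (fun c => pvLabelOf c == l) := by
  have h : pvDictA cands
      = (cands.map (fun c => (pvLabelOf c, c))).foldl
          (fun d p => d.modify p.1 [] (fun v => v ++ [p.2])) PySem.Dict.empty := by
    rw [List.foldl_map]
    rfl
  rw [h, PySem.Dict.getD_foldl_modify_append]
  simp [List.filter_map, Function.comp_def]

-- mem-dependent variant of List.any_congr (Mathlib's List.any_congr is pointwise over all of α)
theorem pvAny_congr {α : Type} (l : List α) {p q : α → Bool} (h : ∀ x ∈ l, p x = q x) :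
    l.any p = l.any q := by
  induction l with
  | nil => rfl
  | cons a t ih =>
      simp only [List.any_cons, h a (by simp), ih (fun x hx => h x (by simp [hx]))]

theorem pvDictA_contains (cands : List (String × String)) (l : String) :
    (pvDictA cands).contains l = cands.any (fun c => pvLabelOf c == l) := by
  have h : pvDictA cands
      = cands.foldl
          (fun d c => d.modify (pvLabelOf c) []
            ((fun (_ : PySem.Dict String (List (String × String))) (_ : String × String)
                (v : List (String × String)) => v ++ [c]) d c)) PySem.Dict.empty := rfl
  rw [h, PySem.Dict.contains_eq_decide_mem_keys, PySem.Dict.keys_foldl_modify_key]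
  simp only [PySem.Dict.keys_empty]
  rw [Bool.eq_iff_iff]
  simp only [decide_eq_true_iff, PySem.Set.mem_update, List.any_eq_true, List.mem_map, beq_iff_eq]
  constructor
  · rintro (hmem | ⟨c, hc, rfl⟩)
    · simp at hmem
    · exact ⟨c, hc, rfl⟩
  · rintro ⟨c, hc, rfl⟩
    exact Or.inr ⟨c, hc, rfl⟩

theorem pvLabelOf_eq_slice (c : String × String) (h : c.1 ≠ "") :
    PySem.Str.slice c.1 none (some 1) = pvLabelOf c := by
  rw [← String.toList_inj]
  have h2 : c.1.toList ≠ [] := by simpa [String.toList_eq_nil_iff] using h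
  obtain ⟨x, xs, hx⟩ := List.exists_cons_of_ne_nil h2
  simp [PySem.Str.toList_slice, PySem.Chars.slice_eq_listSlice, PySem.List.slice, pvLabelOf,
    PySem.Str.pyGet?, hx]

theorem pvLabelOf_eq_take (c : String × String) (h : c.1 ≠ "") :
    String.ofList (c.1.toList.take 1) = pvLabelOf c := by
  have h2 : c.1.toList ≠ [] := by simpa [String.toList_eq_nil_iff] using h
  obtain ⟨x, xs, hx⟩ := List.exists_cons_of_ne_nil h2
  simp only [pvLabelOf, PySem.Str.pyGet?_eq, hx]
  simp [PySem.List.pyGet?, PySem.List.pyIdx?]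

-- under "no empty candidate string", A's dict route and B's filter route build the same lists
theorem pvLists_eq (cands : List (String × String)) (labels : List String)
    (hne : ∀ c ∈ cands, c.1 ≠ "") :
    pvListsA cands labels = pvCandListsB cands labels := by
  unfold pvListsA pvCandListsB
  have hpred : ∀ l, cands.any (fun c => PySem.Str.slice c.1 none (some 1) == l)
      = cands.any (fun c => pvLabelOf c == l) := by
    intro l
    exact pvAny_congr cands (fun c hc => by rw [pvLabelOf_eq_slice c (hne c hc)])
  have hfil : ∀ l, cands.filter (fun c => PySem.Str.slice c.1 none (some 1) == l)
      = cands.filter (fun c => pvLabelOf c == l) := by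
    intro l
    exact List.filter_congr (fun c hc => by rw [pvLabelOf_eq_slice c (hne c hc)])
  rw [List.filter_congr (fun l _ => hpred l)]
  rw [List.filter_congr (fun l _ => (pvDictA_contains cands l).symm)]
  exact List.map_congr_left (fun l _ => by rw [pvDictA_getD, hfil])

theorem pvPresent_eq_filter (labels : List String) (cands : List (String × String)) :
    pvPresent labels cands
      = labels.filter (fun l => decide (l.toList ∈ cands.map (fun c => c.1.toList.take 1))) := by
  unfold pvPresent
  induction labels with
  | nil => rfl
  | cons l ls ih =>
      by_cases h : l.toList ∈ cands.map (fun c => c.1.toList.take 1)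
      · have h' : l.toList ∈ PySem.Set.ofList (pvFirstTokens cands) :=
          (PySem.Set.mem_ofList _ _).mpr h
        simp [pvPresentAux, h, h', ih]
      · have h' : l.toList ∉ PySem.Set.ofList (pvFirstTokens cands) :=
          fun hm => h ((PySem.Set.mem_ofList _ _).mp hm)
        simp [pvPresentAux, h, h', ih]

theorem pvPresent_eq (cands : List (String × String)) (labels : List String)
    (hne : ∀ c ∈ cands, c.1 ≠ "") :
    pvPresent labels cands
      = labels.filter (fun l => cands.any (fun c => pvLabelOf c == l)) := by
  rw [pvPresent_eq_filter]
  refine List.filter_congr (fun l _ => ?_)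
  rw [Bool.eq_iff_iff, decide_eq_true_iff, List.any_eq_true]
  simp only [List.mem_map]
  constructor
  · rintro ⟨c, hc, hcl⟩
    refine ⟨c, hc, ?_⟩
    rw [← pvLabelOf_eq_take c (hne c hc), beq_iff_eq, hcl]
    exact String.ofList_toList
  · rintro ⟨c, hc, hcl⟩
    refine ⟨c, hc, ?_⟩
    rw [← pvLabelOf_eq_take c (hne c hc), beq_iff_eq] at hcl
    rw [← hcl]
    exact String.toList_ofList.symm

theorem pvPresentB_eq (cands : List (String × String)) (labels : List String)
    (hne : ∀ c ∈ cands, c.1 ≠ "") :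
    labels.filter (fun l => cands.any (fun c => PySem.Str.slice c.1 none (some 1) == l))
      = pvPresent labels cands := by
  rw [pvPresent_eq cands labels hne]
  refine List.filter_congr (fun l _ => ?_)
  exact pvAny_congr cands (fun c hc => by rw [pvLabelOf_eq_slice c (hne c hc)])

-- per detected_result: A's rules equal B's rules when the zip-truncated labels have one candidate each
theorem pvItem_eq (dr : ((String × String) × (List String × List String)) × (List (String × String)))
    (hne : ∀ c ∈ dr.2, c.1 ≠ "")
    (hD : ∀ l ∈ (pvPresent dr.1.2.2 dr.2).drop dr.1.2.1.length,
        (pvFirstTokens dr.2).count l.toList ≤ 1) :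
    pvItemA dr = pvItemB dr := by
  unfold pvItemA pvItemB
  rw [pvLists_eq dr.2 dr.1.2.2 hne]
  rw [← pvRunEq (pvCandListsB dr.2 dr.1.2.2) dr.1.2.1 (dr.1.1.1, dr.1.1.2) ?_]
  · simp
  · intro l hl
    unfold pvCandListsB at hl
    rw [← List.map_drop, pvPresentB_eq dr.2 dr.1.2.2 hne] at hl
    · obtain ⟨lab, hlab, rfl⟩ := List.mem_map.mp hl
      have hmem : lab ∈ pvPresent dr.1.2.2 dr.2 := List.mem_of_mem_drop hlab
      have hcount := hD lab hlab
      have hcount' : (dr.2.filter (fun c => PySem.Str.slice c.1 none (some 1) == lab)).length ≤ 1 := by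
        rw [← List.countP_eq_length_filter]
        calc dr.2.countP (fun c => PySem.Str.slice c.1 none (some 1) == lab)
            = dr.2.countP (fun c => c.1.toList.take 1 == lab.toList) := by
              refine List.countP_congr (fun c hc => ?_)
              rw [beq_iff_eq, beq_iff_eq, pvLabelOf_eq_slice c (hne c hc),
                ← pvLabelOf_eq_take c (hne c hc)]
              constructor
              · intro h; rw [← h]; exact String.toList_ofList.symm
              · intro h; rw [← @String.ofList_toList lab, ← h]
          _ = (pvFirstTokens dr.2).count lab.toList := by
              rw [pvFirstTokens, List.count_eq_countP, List.countP_map]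
              rfl
          _ ≤ 1 := hcount
      have hpos : (dr.2.filter (fun c => PySem.Str.slice c.1 none (some 1) == lab)).length ≥ 1 := by
        have hin : lab ∈ List.filter (fun l => dr.2.any fun c => PySem.Str.slice c.1 none (some 1) == l) dr.1.2.2 := by
          rw [pvPresentB_eq dr.2 dr.1.2.2 hne]
          exact hmem
        have hany := (List.mem_filter.mp hin).2
        obtain ⟨c, hc, hcp⟩ := List.any_eq_true.mp hany
        have : c ∈ dr.2.filter (fun c => PySem.Str.slice c.1 none (some 1) == lab) :=
          List.mem_filter.mpr ⟨hc, hcp⟩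
        exact List.length_pos_of_mem this
      have : (dr.2.filter (fun c => PySem.Str.slice c.1 none (some 1) == lab)).length = 1 := le_antisymm hcount' hpos
      exact List.length_eq_one_iff.mp this

-- the two outer loops are flatMaps over the items
theorem pvA_eq (all : List (((String × String) × (List String × List String)) × (List (String × String)))) :
    combinate_sentence_rules_with_duplication all = all.flatMap pvItemA := by
  suffices h : ∀ (all : List (((String × String) × (List String × List String)) × (List (String × String))))
      (acc : List (List String)),
      all.foldl
        (fun complete detected_result =>
          let sentence_rule := detected_result.1.1
          let category_label_slots := detected_result.1.2
          let slot_candidates := detected_result.2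
          let sentence_structure := sentence_rule.1
          let form_structure := sentence_rule.2
          let slots_with_labels := category_label_slots.1
          let labels := category_label_slots.2
          let label_to_candidates :=
            slot_candidates.foldl
              (fun d candidate => d.modify (pvLabelOf candidate) [] (fun v => v ++ [candidate]))
              PySem.Dict.empty
          let slot_filled_combinations :=
            labels.foldl
              (fun acc label =>
                if label_to_candidates.contains label then acc ++ [label_to_candidates.getD label []] else acc)
              []
          let all_combinations := pvProduct slot_filled_combinations
          all_combinations.foldl
            (fun complete combination =>
              let filled := (slots_with_labels.zip combination).foldl pvFillA (sentence_structure, form_structure)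
              complete ++ [[filled.1, filled.2]])
            complete) acc
        = acc ++ all.flatMap pvItemA by
    unfold combinate_sentence_rules_with_duplication
    simpa only [List.nil_append] using h all []
  intro all
  induction all with
  | nil => simp
  | cons dr rest ih =>
      intro acc
      simp only [List.foldl_cons]
      rw [ih]
      rw [PySem.List.foldl_append_singleton_eq_map]
      rw [PySem.List.foldl_append_if]
      simp [pvItemA, pvListsA, pvDictA, List.append_assoc]
theorem pvB_eq (all : List (((String × String) × (List String × List String)) × (List (String × String)))) :
    combinate_sentence_rules_with_duplication_alt all = all.flatMap pvItemB := by
  suffices h : ∀ (all : List (((String × String) × (List String × List String)) × (List (String × String))))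
      (acc : List (List String)),
      all.foldl
        (fun results dr =>
          let sentence_structure := dr.1.1.1
          let form_structure := dr.1.1.2
          let slots_with_labels := dr.1.2.1
          let labels := dr.1.2.2
          let slot_candidates := dr.2
          let candidate_lists :=
            (labels.filter (fun label =>
                slot_candidates.any (fun c => PySem.Str.slice c.1 none (some 1) == label))).map
              (fun label => slot_candidates.filter (fun c => PySem.Str.slice c.1 none (some 1) == label))
          let partials := (slots_with_labels.zip candidate_lists).foldl pvStepB [(sentence_structure, form_structure)]
          results ++ partials.map (fun p => [p.1, p.2])) acc
        = acc ++ all.flatMap pvItemB by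
    unfold combinate_sentence_rules_with_duplication_alt
    simpa only [List.nil_append] using h all []
  intro all
  induction all with
  | nil => simp
  | cons dr rest ih =>
      intro acc
      simp only [List.foldl_cons]
      rw [ih]
      simp [pvItemB, pvCandListsB, List.append_assoc]

-- ===== VERDICT (by name: the statement is the Claim_ definition above) =====
theorem combinate_sentence_rules_with_duplication_spec : Claim_equal_combinate_sentence_rules_with_duplication := by
  intro all _hdom hpre
  show combinate_sentence_rules_with_duplication all = combinate_sentence_rules_with_duplication_alt all
  rw [pvA_eq, pvB_eq]
  refine List.flatMap_congr (fun dr hdr => ?_)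
  exact pvItem_eq dr ((hpre dr hdr).1) ((hpre dr hdr).2.2)
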